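-- pv_equiv track=rewrite | github.com/peterkitch/spy-project | project/trafficflow.py | _combine_next_list
-- ===== SOURCE A (Python) =====
-- from typing import Any, Dict, List, Optional, Tuple
--
-- def _combine_next_list(next_list: List[str]) -> str:
--     """Unanimity on next signals. Buy-only→Buy, Short-only→Short, mixed/none→Cash."""
--     act = [s for s in next_list if s in ("Buy", "Short")]
--     if not act:
--         return "Cash"
--     if all(s == "Buy" for s in act):
--         return "Buy"
--     if all(s == "Short" for s in act):
--         return "Short"
--     return "Cash"
-- ===== SOURCE B (Python) =====
-- from typing import List
--
-- def _combine_next_list(next_list: List[str]) -> str: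
--     has_buy = False
--     has_short = False
--     for s in next_list:
--         if s == "Buy":
--             has_buy = True
--         elif s == "Short":
--             has_short = True
--     if has_buy and not has_short:
--         return "Buy"
--     if has_short and not has_buy:
--         return "Short"
--     return "Cash"
-- ===== Notes on version B (the rewrite author's own statement) =====
-- stated objective: simpler
-- what changed: Replaces the filtered intermediate list and two all() passes by a single scan maintaining two booleans has_buy/has_short and a final two-flag decision.
import Mathlib
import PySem

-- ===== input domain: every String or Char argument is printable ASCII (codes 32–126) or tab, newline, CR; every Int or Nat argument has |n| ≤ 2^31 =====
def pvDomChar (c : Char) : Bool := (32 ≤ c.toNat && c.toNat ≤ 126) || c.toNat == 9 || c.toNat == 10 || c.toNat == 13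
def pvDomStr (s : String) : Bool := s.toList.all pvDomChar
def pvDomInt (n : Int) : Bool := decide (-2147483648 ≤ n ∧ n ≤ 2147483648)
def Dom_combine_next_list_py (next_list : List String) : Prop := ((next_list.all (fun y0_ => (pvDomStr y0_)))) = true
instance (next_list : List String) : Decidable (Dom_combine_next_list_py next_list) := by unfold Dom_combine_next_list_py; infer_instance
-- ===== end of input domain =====

-- B replaces A's filtered intermediate list and two all() passes by one scan keeping two booleans (objective: simpler).

-- ===== PORT A =====
def combine_next_list_py (next_list : List String) : String :=
  let act := next_list.filter (fun s => s == "Buy" || s == "Short")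
  if act = [] then "Cash"
  else if act.all (fun s => s == "Buy") then "Buy"
  else if act.all (fun s => s == "Short") then "Short"
  else "Cash"

-- ===== PORT B =====
def cnlStep (p : Bool × Bool) (s : String) : Bool × Bool :=
  if s == "Buy" then (true, p.2)
  else if s == "Short" then (p.1, true)
  else p

def combine_next_list_py_alt (next_list : List String) : String :=
  let flags := next_list.foldl cnlStep (false, false)
  if flags.1 && !flags.2 then "Buy"
  else if flags.2 && !flags.1 then "Short"
  else "Cash"

-- ===== PRECONDITION & SPEC =====
def Spec_combine_next_list_py (next_list : List String) (out : String) : Prop := out = combine_next_list_py_alt next_list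
instance (next_list : List String) (out : String) : Decidable (Spec_combine_next_list_py next_list out) := by unfold Spec_combine_next_list_py; infer_instance

-- ===== CLAIM (what is proved, stated in full; the proofs are below) =====
def Claim_equal_combine_next_list_py : Prop := ∀ (next_list : List String), Dom_combine_next_list_py next_list → Spec_combine_next_list_py next_list (combine_next_list_py next_list)

-- ===== LEMMAS AND PROOFS =====
theorem cnl_foldl (l : List String) (hb hs : Bool) :
    l.foldl cnlStep (hb, hs) =
      (hb || l.any (fun s => s == "Buy"), hs || l.any (fun s => s == "Short")) := by
  induction l generalizing hb hs with
  | nil => simp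
  | cons x xs ih =>
    simp only [List.foldl_cons, List.any_cons, cnlStep]
    by_cases hB : x == "Buy"
    · have hx : x = "Buy" := by simpa using hB
      subst hx; simp [ih]
    · by_cases hS : x == "Short"
      · have hx : x = "Short" := by simpa using hS
        subst hx; simp [ih]
      · simp [hB, hS, ih]

theorem cnl_filter_nil (l : List String) :
    (l.filter (fun s => s == "Buy" || s == "Short") = []) ↔
      (l.any (fun s => s == "Buy") = false ∧ l.any (fun s => s == "Short") = false) := by
  simp only [List.filter_eq_nil_iff, List.any_eq_false]
  constructor
  · intro h
    exact ⟨fun a ha => by have := h a ha; simp_all, fun a ha => by have := h a ha; simp_all⟩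
  · intro ⟨h1, h2⟩ a ha
    have := h1 a ha; have := h2 a ha; simp_all

theorem cnl_all_buy (l : List String) :
    ((l.filter (fun s => s == "Buy" || s == "Short")).all (fun s => s == "Buy") = true) ↔
      (l.any (fun s => s == "Short") = false) := by
  simp only [List.all_filter, List.all_eq_true, List.any_eq_false]
  constructor
  · intro h a ha hS
    have := h a ha
    have : a = "Short" := by simpa using hS
    simp_all
  · intro h a ha
    have := h a ha
    by_cases hB : a == "Buy" <;> simp_all

theorem cnl_all_short (l : List String) :
    ((l.filter (fun s => s == "Buy" || s == "Short")).all (fun s => s == "Short") = true) ↔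
      (l.any (fun s => s == "Buy") = false) := by
  simp only [List.all_filter, List.all_eq_true, List.any_eq_false]
  constructor
  · intro h a ha hB
    have := h a ha
    have : a = "Buy" := by simpa using hB
    simp_all
  · intro h a ha
    have := h a ha
    by_cases hS : a == "Short" <;> simp_all

-- ===== VERDICT (by name: the statement is the Claim_ definition above) =====
theorem combine_next_list_py_spec : Claim_equal_combine_next_list_py := by
  intro l _
  unfold Spec_combine_next_list_py combine_next_list_py combine_next_list_py_alt
  rw [cnl_foldl]
  rcases hB : l.any (fun s => s == "Buy") <;> rcases hS : l.any (fun s => s == "Short")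
  · rw [if_pos ((cnl_filter_nil l).mpr ⟨hB, hS⟩)]; simp
  · rw [if_neg (fun h => by have := ((cnl_filter_nil l).mp h).2; simp_all),
      if_neg (fun h => by have := (cnl_all_buy l).mp h; simp_all),
      if_pos ((cnl_all_short l).mpr hB)]; simp
  · rw [if_neg (fun h => by have := ((cnl_filter_nil l).mp h).1; simp_all),
      if_pos ((cnl_all_buy l).mpr hS)]; simp
  · rw [if_neg (fun h => by have := ((cnl_filter_nil l).mp h).1; simp_all),
      if_neg (fun h => by have := (cnl_all_buy l).mp h; simp_all),
      if_neg (fun h => by have := (cnl_all_short l).mp h; simp_all)]; simp
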